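-- pv_equiv track=rewrite | github.com/netor27/codefights-arcade-solutions | python/arcade-theCore/06_LabyrinthOfNestedLoops/048_WeakNumbers.py | weakNumbers
-- ===== SOURCE A (Python) =====
-- def weakNumbers(n):
--     '''
--     We define the weakness of number x as the number of positive integers smaller than x that have more divisors than x.
--
--     It follows that the weaker the number, the greater overall weakness it has. For the given integer n,
--     you need to answer two questions:
--
--     what is the weakness of the weakest numbers in the range [1, n]?
--     how many numbers in the range [1, n] have this weakness?
--
--     Return the answer as an array of two elements, where the first element is the answer to the first question,
--     and the second element is the answer to the second question.
--     '''
--     divisors = { i:numOfDivisors(i) for i in range(1, n + 1) }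
--     maxWeakness = 0
--     numsWithMaxWeakness = 0
--     for i in range(1, n+1):
--         weakness = sum([1 if divisors[j] > divisors[i] else 0 for j in range(1, i)])
--         if weakness > maxWeakness:
--             maxWeakness = weakness
--             numsWithMaxWeakness = 1
--         elif weakness == maxWeakness:
--             numsWithMaxWeakness += 1
--
--     return [maxWeakness, numsWithMaxWeakness]
--
-- def numOfDivisors(n):
--     return sum([1 if n % i == 0 else 0 for i in range(1, n // 2 + 1)]) + 1
-- ===== SOURCE B (Python) =====
-- def weakNumbers(n):
--     # Sieve the divisor counts of 1..n in O(n log n), then a single left-to-right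
--     # pass: a frequency table of divisor counts seen so far gives each number's
--     # weakness as a suffix sum, while the running max/count is updated as usual.
--     if n <= 0:
--         return [0, 0]
--     d = [0] * (n + 1)
--     for i in range(1, n + 1):
--         for j in range(i, n + 1, i):
--             d[j] += 1
--     m = max(d)
--     freq = [0] * (m + 1)
--     best = 0
--     cnt = 0
--     for i in range(1, n + 1):
--         w = sum(freq[d[i] + 1:])
--         if w > best:
--             best = w
--             cnt = 1
--         elif w == best:
--             cnt += 1
--         freq[d[i]] += 1
--     return [best, cnt]
-- ===== Notes on version B (the rewrite author's own statement) =====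
-- stated objective: faster
-- what changed: B replaces A's per-number trial division (numOfDivisors) and per-number rescan of all smaller numbers with a multiples sieve that fills all divisor counts at once, plus a single left-to-right pass that reads each number's weakness off a frequency table of divisor counts seen so far (suffix sum), instead of comparing against every earlier number.
import Mathlib
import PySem

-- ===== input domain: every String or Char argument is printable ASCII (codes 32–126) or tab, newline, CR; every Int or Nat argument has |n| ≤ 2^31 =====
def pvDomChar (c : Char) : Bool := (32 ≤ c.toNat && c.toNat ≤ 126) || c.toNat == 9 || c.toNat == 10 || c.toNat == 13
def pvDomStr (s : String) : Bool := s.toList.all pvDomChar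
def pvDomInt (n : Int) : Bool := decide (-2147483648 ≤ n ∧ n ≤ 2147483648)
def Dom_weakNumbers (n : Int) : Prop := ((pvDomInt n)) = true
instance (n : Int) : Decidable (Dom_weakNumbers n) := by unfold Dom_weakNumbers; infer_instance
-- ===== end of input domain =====

-- B replaces A's trial-division + rescan-of-all-smaller-numbers (O(n^2)) by a divisor-count
-- sieve and one pass over a frequency table of divisor counts (measured faster, asymptotic).


-- ===== PORT A =====
def numOfDivisors (m : Int) : Int :=
  ((PySem.List.pyRange 1 (PySem.Int.floordiv m 2 + 1) 1).map
    (fun i => if PySem.Int.mod m i = 0 then (1 : Int) else 0)).sum + 1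

def weakNumbers (n : Int) : List Int :=
  let divisors : PySem.Dict Int Int :=
    (PySem.List.pyRange 1 (n + 1) 1).foldl
      (fun d i => d.insert i (numOfDivisors i)) PySem.Dict.empty
  -- divisors[j] / divisors[i]: the keys 1..n are always present here, so getD 0 is exact
  let st : Int × Int :=
    (PySem.List.pyRange 1 (n + 1) 1).foldl
      (fun (st : Int × Int) i =>
        -- divisors[i] is loop-invariant in the comprehension; bound once (same value each j)
        let di := divisors.getD i 0
        let weakness :=
          ((PySem.List.pyRange 1 i 1).map
            (fun j => if divisors.getD j 0 > di then (1 : Int) else 0)).sum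
        if weakness > st.1 then (weakness, 1)
        else if weakness = st.1 then (st.1, st.2 + 1)
        else st)
      (0, 0)
  [st.1, st.2]

-- ===== PORT B =====
def weakNumbers_alt (n : Int) : List Int :=
  if n ≤ 0 then [0, 0]
  else
    let d : List Int :=
      (PySem.List.pyRange 1 (n + 1) 1).foldl
        (fun d i =>
          (PySem.List.pyRange i (n + 1) i).foldl
            (fun d j => PySem.List.pySetD d j (PySem.List.pyGetD d j 0 + 1)) d)
        (List.replicate (n + 1).toNat 0)
    -- max(d): d is nonempty here (length n+1 ≥ 2), so max? is some and getD 0 is exact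
    let m : Int := (PySem.List.max? d (fun x => x)).getD 0
    let st : List Int × Int × Int :=
      (PySem.List.pyRange 1 (n + 1) 1).foldl
        (fun (s : List Int × Int × Int) i =>
          let freq := s.1
          let best := s.2.1
          let cnt := s.2.2
          let w := (PySem.List.slice freq (some (PySem.List.pyGetD d i 0 + 1)) none).sum
          let s' : Int × Int :=
            if w > best then (w, 1)
            else if w = best then (best, cnt + 1)
            else (best, cnt)
          (PySem.List.pySetD freq (PySem.List.pyGetD d i 0)
             (PySem.List.pyGetD freq (PySem.List.pyGetD d i 0) 0 + 1), s'))
        (List.replicate (m + 1).toNat 0, 0, 0)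
    [st.2.1, st.2.2]

-- ===== PRECONDITION & SPEC =====
def Spec_weakNumbers (n : Int) (out : List Int) : Prop := out = weakNumbers_alt n
instance (n : Int) (out : List Int) : Decidable (Spec_weakNumbers n out) := by unfold Spec_weakNumbers; infer_instance

-- ===== CLAIM (what is proved, stated in full; the proofs are below) =====
def Claim_equal_weakNumbers : Prop := ∀ (n : Int), Dom_weakNumbers n → Spec_weakNumbers n (weakNumbers n)

-- ===== LEMMAS AND PROOFS =====

-- reference quantities both ports are reduced to
def pvDvalN (x : Int) : Nat := (PySem.List.pyRange 1 (x + 1) 1).countP (fun k => decide (k ∣ x))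
def pvDval (x : Int) : Int := (pvDvalN x : Int)

theorem no_big_divisor (x i : Int) (hx : 1 ≤ x) (hi : PySem.Int.floordiv x 2 < i) (hix : i < x) :
    ¬ i ∣ x := by
  intro hdvd
  have hfd : PySem.Int.floordiv x 2 = x / 2 := PySem.Int.floordiv_eq_ediv_of_pos (by norm_num)
  rw [hfd] at hi
  have hi0 : 0 < i := by omega
  rcases hdvd with ⟨t, hxt⟩
  have h2t : 2 ≤ t := by nlinarith
  have h2i : 2 * i ≤ x := by nlinarith
  omega

theorem numOfDivisors_eq (x : Int) (hx : 1 ≤ x) : numOfDivisors x = pvDval x := by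
  have hfd : PySem.Int.floordiv x 2 = x / 2 := PySem.Int.floordiv_eq_ediv_of_pos (by norm_num)
  unfold numOfDivisors pvDval pvDvalN
  have hmap : (fun i => if PySem.Int.mod x i = 0 then (1 : Int) else 0)
      = fun i => if (decide (i ∣ x)) = true then 1 else 0 := by
    funext i; simp [PySem.Int.mod_eq_zero_iff_dvd]
  rw [hmap, PySem.List.sum_map_ite_one_zero]
  rw [PySem.List.pyRange_one_append 1 (PySem.Int.floordiv x 2 + 1) (x + 1) (by omega) (by omega)]
  rw [PySem.List.pyRange_one_append (PySem.Int.floordiv x 2 + 1) x (x + 1) (by omega) (by omega)]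
  rw [PySem.List.pyRange_one_singleton]
  rw [List.countP_append, List.countP_append]
  have hzero : (PySem.List.pyRange (PySem.Int.floordiv x 2 + 1) x 1).countP (fun k => decide (k ∣ x)) = 0 := by
    rw [List.countP_eq_zero]
    intro a ha
    rw [PySem.List.mem_pyRange_one] at ha
    simpa using no_big_divisor x a hx (by omega) (by omega)
  rw [hzero]
  simp

theorem getD_foldl_insert_of_not_mem (l : List Int) (f : Int → Int) (d : PySem.Dict Int Int)
    (k : Int) (hk : k ∉ l) :
    (l.foldl (fun d i => d.insert i (f i)) d).getD k 0 = d.getD k 0 := by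
  induction l generalizing d with
  | nil => rfl
  | cons x l ih =>
    simp only [List.foldl_cons]
    rw [ih _ (by simp_all), PySem.Dict.getD_insert]
    simp_all

theorem getD_foldl_insert_of_mem (l : List Int) (f : Int → Int) (d : PySem.Dict Int Int)
    (k : Int) (hk : k ∈ l) :
    (l.foldl (fun d i => d.insert i (f i)) d).getD k 0 = f k := by
  induction l generalizing d with
  | nil => simp at hk
  | cons x l ih =>
    simp only [List.foldl_cons]
    by_cases h : k ∈ l
    · exact ih _ h
    · have hkx : k = x := by simp_all
      rw [getD_foldl_insert_of_not_mem l f _ k h, PySem.Dict.getD_insert]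
      simp [hkx]

def pvStep (s : Int × Int) (w : Int) : Int × Int :=
  if w > s.1 then (w, 1) else if w = s.1 then (s.1, s.2 + 1) else s
def pvW (i : Int) : Int :=
  ((PySem.List.pyRange 1 i 1).map (fun j => if pvDval j > pvDval i then (1 : Int) else 0)).sum
def pvRef (n : Int) : Int × Int :=
  (PySem.List.pyRange 1 (n + 1) 1).foldl (fun s i => pvStep s (pvW i)) (0, 0)

theorem weakNumbers_eq_ref (n : Int) :
    weakNumbers n = [(pvRef n).1, (pvRef n).2] := by
  have hget : ∀ k ∈ PySem.List.pyRange 1 (n + 1) 1,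
      (((PySem.List.pyRange 1 (n + 1) 1).foldl
        (fun d i => d.insert i (numOfDivisors i)) PySem.Dict.empty).getD k 0) = pvDval k := by
    intro k hk
    rw [getD_foldl_insert_of_mem _ _ _ _ hk]
    exact numOfDivisors_eq k (by rw [PySem.List.mem_pyRange_one] at hk; omega)
  have hfold : (PySem.List.pyRange 1 (n + 1) 1).foldl
      (fun (st : Int × Int) i =>
        let weakness :=
          ((PySem.List.pyRange 1 i 1).map
            (fun j => if (((PySem.List.pyRange 1 (n + 1) 1).foldl
              (fun d i => d.insert i (numOfDivisors i)) PySem.Dict.empty).getD j 0) >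
              (((PySem.List.pyRange 1 (n + 1) 1).foldl
              (fun d i => d.insert i (numOfDivisors i)) PySem.Dict.empty).getD i 0)
             then (1 : Int) else 0)).sum
        if weakness > st.1 then (weakness, 1)
        else if weakness = st.1 then (st.1, st.2 + 1)
        else st)
      (0, 0)
    = (PySem.List.pyRange 1 (n + 1) 1).foldl (fun s i => pvStep s (pvW i)) (0, 0) := by
    apply PySem.List.foldl_congr_mem
    intro s i hi
    have hw : ∀ j ∈ PySem.List.pyRange 1 i 1,
        (if (((PySem.List.pyRange 1 (n + 1) 1).foldl
              (fun d i => d.insert i (numOfDivisors i)) PySem.Dict.empty).getD j 0) >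
            (((PySem.List.pyRange 1 (n + 1) 1).foldl
              (fun d i => d.insert i (numOfDivisors i)) PySem.Dict.empty).getD i 0)
         then (1 : Int) else 0)
        = (if pvDval j > pvDval i then (1 : Int) else 0) := by
      intro j hj
      rw [hget i hi, hget j ?_]
      rw [PySem.List.mem_pyRange_one] at hi hj ⊢
      omega
    simp only [pvStep, pvW, List.map_congr_left hw]
    rfl
  simp only [weakNumbers, pvRef]
  rw [hfold]

def pvInc (d : List Int) (j : Int) : List Int :=
  PySem.List.pySetD d j (PySem.List.pyGetD d j 0 + 1)

theorem pvInc_foldl_length (L : List Int) (d : List Int) :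
    (L.foldl pvInc d).length = d.length := by
  induction L generalizing d with
  | nil => rfl
  | cons x L ih => simp [List.foldl_cons, ih, pvInc]

theorem pvInc_foldl_getD (L : List Int) (d : List Int) (q : Int)
    (hL : ∀ x ∈ L, 0 ≤ x ∧ x < (d.length : Int)) (hq0 : 0 ≤ q) (hq1 : q < (d.length : Int)) :
    PySem.List.pyGetD (L.foldl pvInc d) q 0 = PySem.List.pyGetD d q 0 + (L.count q : Int) := by
  induction L generalizing d with
  | nil => simp
  | cons x L ih =>
    obtain ⟨hx0, hx1⟩ := hL x List.mem_cons_self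
    obtain ⟨nx, rfl⟩ : ∃ nn : Nat, x = (nn : Int) := ⟨x.toNat, (Int.toNat_of_nonneg hx0).symm⟩
    obtain ⟨nq, rfl⟩ : ∃ nn : Nat, q = (nn : Int) := ⟨q.toNat, (Int.toNat_of_nonneg hq0).symm⟩
    have hlen : (pvInc d nx).length = d.length := by simp [pvInc]
    simp only [List.foldl_cons]
    rw [ih (pvInc d nx) (by rw [hlen]; exact fun y hy => hL y (List.mem_cons_of_mem _ hy))
        (by rw [hlen]; exact hq1)]
    unfold pvInc
    rw [PySem.List.pyGetD_pySetD_natCast d nx nq _ _ (by omega), List.count_cons]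
    by_cases h : nq = nx <;> simp [h] <;> omega

theorem sieve_foldl_getD (O : List Int) (g : Int → List Int) (d : List Int) (q : Int)
    (hO : ∀ i ∈ O, ∀ x ∈ g i, 0 ≤ x ∧ x < (d.length : Int)) (hq0 : 0 ≤ q)
    (hq1 : q < (d.length : Int)) :
    PySem.List.pyGetD (O.foldl (fun d i => (g i).foldl pvInc d) d) q 0
      = PySem.List.pyGetD d q 0 + (O.map (fun i => (((g i).count q : Nat) : Int))).sum := by
  induction O generalizing d with
  | nil => simp
  | cons o O ih =>
    have hlen : ((g o).foldl pvInc d).length = d.length := pvInc_foldl_length _ _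
    simp only [List.foldl_cons, List.map_cons, List.sum_cons]
    rw [ih ((g o).foldl pvInc d)
        (by rw [hlen]; exact fun i hi => hO i (List.mem_cons_of_mem _ hi))
        (by rw [hlen]; exact hq1)]
    rw [pvInc_foldl_getD (g o) d q (hO o List.mem_cons_self) hq0 hq1]
    ring

theorem count_multiples (i j n : Int) (hi : 1 ≤ i) (hj1 : 1 ≤ j) (hjn : j ≤ n) :
    ((PySem.List.pyRange i (n + 1) i).count j : Int) = if i ∣ j then 1 else 0 := by
  have hpos : (0 : Int) < i := by omega
  have hmem : j ∈ PySem.List.pyRange i (n + 1) i ↔ i ∣ j := by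
    rw [PySem.List.mem_pyRange_iff_of_pos hpos]
    constructor
    · rintro ⟨h1, h2, h3⟩
      have := dvd_add h3 (dvd_refl i)
      simpa using this
    · intro h
      exact ⟨Int.le_of_dvd (by omega) h, by omega, dvd_sub h (dvd_refl i)⟩
  have hnd : (PySem.List.pyRange i (n + 1) i).Nodup := by
    rw [PySem.List.pyRange_of_pos _ _ hpos]
    refine List.Nodup.map ?_ (List.nodup_range)
    intro a b hab
    have : i * (a : Int) = i * (b : Int) := by linarith
    have := mul_left_cancel₀ (by omega : i ≠ 0) this
    exact_mod_cast this
  by_cases h : i ∣ j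
  · rw [List.count_eq_one_of_mem hnd (hmem.mpr h)]; simp [h]
  · rw [List.count_eq_zero.mpr (fun hc => h (hmem.mp hc))]; simp [h]

theorem sieve_value (n j : Int) (hn : 1 ≤ n) (hj1 : 1 ≤ j) (hjn : j ≤ n) :
    PySem.List.pyGetD
      ((PySem.List.pyRange 1 (n + 1) 1).foldl
        (fun d i => (PySem.List.pyRange i (n + 1) i).foldl pvInc d)
        (List.replicate (n + 1).toNat 0)) j 0 = pvDval j := by
  have hlen : ((List.replicate (n + 1).toNat (0 : Int)).length : Int) = n + 1 := by
    simp; omega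
  rw [sieve_foldl_getD _ _ _ _ ?_ (by omega) (by omega)]
  · have hbase : PySem.List.pyGetD (List.replicate (n + 1).toNat (0 : Int)) j 0 = 0 := by
      rw [PySem.List.pyGetD_eq_getElem _ _ (by omega) (by omega)]
      simp
    rw [hbase]
    have hmap : (PySem.List.pyRange 1 (n + 1) 1).map
        (fun i => (((PySem.List.pyRange i (n + 1) i).count j : Nat) : Int))
        = (PySem.List.pyRange 1 (n + 1) 1).map
          (fun i => if (decide (i ∣ j)) = true then (1 : Int) else 0) := by
      apply List.map_congr_left
      intro i hi
      rw [PySem.List.mem_pyRange_one] at hi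
      rw [count_multiples i j n (by omega) hj1 hjn]
      simp
    rw [hmap, PySem.List.sum_map_ite_one_zero]
    unfold pvDval pvDvalN
    rw [PySem.List.pyRange_one_append 1 (j + 1) (n + 1) (by omega) (by omega),
        List.countP_append]
    have : (PySem.List.pyRange (j + 1) (n + 1) 1).countP (fun k => decide (k ∣ j)) = 0 := by
      rw [List.countP_eq_zero]
      intro a ha
      rw [PySem.List.mem_pyRange_one] at ha
      simp only [decide_eq_true_eq]
      intro hd
      have := Int.le_of_dvd (by omega) hd
      omega
    rw [this]
    simp
  · intro i hi x hx
    rw [PySem.List.mem_pyRange_one] at hi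
    rw [PySem.List.mem_pyRange_iff_of_pos (by omega)] at hx
    constructor <;> [omega; (rw [hlen]; omega)]

def pvF (m : Int) (P : List Int) : List Int :=
  (List.range (m + 1).toNat).map (fun v => ((P.countP (fun j => decide (pvDvalN j = v)) : Nat) : Int))

theorem pvF_nil (m : Int) : pvF m [] = List.replicate (m + 1).toNat 0 := by
  simp [pvF, List.map_const']

theorem sum_drop_pvF (m : Int) (P : List Int) (c : Nat)
    (hP : ∀ j ∈ P, (pvDvalN j : Int) ≤ m) :
    ((pvF m P).drop (c + 1)).sum = ((P.countP (fun j => decide (c < pvDvalN j)) : Nat) : Int) := by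
  unfold pvF
  rw [← List.map_drop, List.range_eq_range', List.drop_range']
  induction P with
  | nil => simp
  | cons j P ih =>
    have hj := hP j List.mem_cons_self
    have hm : 0 ≤ m := le_trans (by positivity) hj
    have hmap : (List.range' (0 + (c + 1) * 1) ((m + 1).toNat - (c + 1))).map
        (fun v => (((j :: P).countP (fun j => decide (pvDvalN j = v)) : Nat) : Int))
        = (List.range' (0 + (c + 1) * 1) ((m + 1).toNat - (c + 1))).map
          (fun v => ((P.countP (fun j => decide (pvDvalN j = v)) : Nat) : Int)
            + if (decide (pvDvalN j = v)) = true then (1 : Int) else 0) := by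
      apply List.map_congr_left
      intro v _
      rw [List.countP_cons]
      split <;> push_cast <;> omega
    rw [hmap, PySem.List.sum_map_add_int, ih (fun x hx => hP x (List.mem_cons_of_mem _ hx)),
        PySem.List.sum_map_ite_one_zero]
    have hcount : (List.range' (0 + (c + 1) * 1) ((m + 1).toNat - (c + 1))).countP
        (fun v => decide (pvDvalN j = v)) = if c < pvDvalN j then 1 else 0 := by
      have hpred : ∀ v ∈ List.range' (0 + (c + 1) * 1) ((m + 1).toNat - (c + 1)),
          (decide (pvDvalN j = v)) = (v == pvDvalN j) := by
        intro v _
        rw [Bool.eq_iff_iff]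
        simp only [decide_eq_true_eq, beq_iff_eq]
        exact ⟨Eq.symm, Eq.symm⟩
      rw [List.countP_congr (fun v hv => by rw [hpred v hv])]
      rw [← List.count_eq_countP]
      by_cases h : c < pvDvalN j
      · rw [List.count_eq_one_of_mem (List.nodup_range' 1) ?_]
        · simp [h]
        · rw [List.mem_range'_1]; omega
      · rw [List.count_eq_zero.mpr ?_]
        · simp [h]
        · rw [List.mem_range'_1]; omega
    rw [hcount, List.countP_cons]
    simp only [decide_eq_true_eq]
    push_cast
    split <;> omega

theorem pvF_getD (m : Int) (P : List Int) (k : Nat) (hk : k < (m + 1).toNat) :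
    (pvF m P).getD k 0 = ((P.countP (fun j => decide (pvDvalN j = k)) : Nat) : Int) := by
  unfold pvF
  rw [List.getD_eq_getElem?_getD]
  simp [hk]

theorem pvF_step (m : Int) (P : List Int) (i : Int) (hi : (pvDvalN i : Int) ≤ m) :
    PySem.List.pySetD (pvF m P) (pvDval i) (PySem.List.pyGetD (pvF m P) (pvDval i) 0 + 1)
      = pvF m (P ++ [i]) := by
  have hm : 0 ≤ m := le_trans (by positivity) hi
  have hk : pvDvalN i < (m + 1).toNat := by omega
  unfold pvDval
  rw [PySem.List.pySetD_natCast, PySem.List.pyGetD_natCast, pvF_getD m P _ hk]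
  apply List.ext_getElem
  · simp [pvF]
  · intro v hv1 hv2
    simp only [pvF, List.length_map, List.length_range] at hv2
    rw [List.getElem_set]
    simp only [pvF, List.getElem_map, List.getElem_range]
    rw [List.countP_append, List.countP_cons, List.countP_nil]
    by_cases h : pvDvalN i = v
    · subst h
      push_cast
      simp
    · rw [if_neg h, if_neg (by simp only [decide_eq_true_eq]; exact h)]
      push_cast
      omega


theorem pvW_eq_countP (i : Int) :
    pvW i = (((PySem.List.pyRange 1 i 1).countP (fun j => decide (pvDvalN i < pvDvalN j)) : Nat) : Int) := by
  unfold pvW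
  have : (fun j => if pvDval j > pvDval i then (1 : Int) else 0)
      = fun j => if (decide (pvDvalN i < pvDvalN j)) = true then (1 : Int) else 0 := by
    funext j
    simp only [decide_eq_true_eq, pvDval, gt_iff_lt, Nat.cast_lt]
  rw [this, PySem.List.sum_map_ite_one_zero]

theorem slice_sum_eq_pvW (m i : Int) (P : List Int) (hP : ∀ j ∈ P, (pvDvalN j : Int) ≤ m)
    (hPiff : P = PySem.List.pyRange 1 i 1) :
    (PySem.List.slice (pvF m P) (some (pvDval i + 1)) none).sum = pvW i := by
  have hcast : pvDval i + 1 = ((pvDvalN i + 1 : Nat) : Int) := by unfold pvDval; push_cast; ring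
  rw [hcast, PySem.List.slice_from _ (by positivity), Int.toNat_natCast,
      sum_drop_pvF m P (pvDvalN i) hP, pvW_eq_countP, hPiff]

theorem pvLoop (dd : List Int) (m n : Int)
    (hdd : ∀ j, 1 ≤ j → j ≤ n → PySem.List.pyGetD dd j 0 = pvDval j)
    (hm : ∀ j, 1 ≤ j → j ≤ n → pvDval j ≤ m) :
    ∀ t : Nat, (t : Int) ≤ n →
    ((PySem.List.pyRange 1 (1 + (t : Int)) 1).foldl
      (fun (s : List Int × Int × Int) i =>
        (PySem.List.pySetD s.1 (PySem.List.pyGetD dd i 0)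
           (PySem.List.pyGetD s.1 (PySem.List.pyGetD dd i 0) 0 + 1),
         if (PySem.List.slice s.1 (some (PySem.List.pyGetD dd i 0 + 1)) none).sum > s.2.1
         then ((PySem.List.slice s.1 (some (PySem.List.pyGetD dd i 0 + 1)) none).sum, 1)
         else if (PySem.List.slice s.1 (some (PySem.List.pyGetD dd i 0 + 1)) none).sum = s.2.1
         then (s.2.1, s.2.2 + 1) else (s.2.1, s.2.2)))
      (List.replicate (m + 1).toNat 0, 0, 0))
    = (pvF m (PySem.List.pyRange 1 (1 + (t : Int)) 1),
       (PySem.List.pyRange 1 (1 + (t : Int)) 1).foldl (fun s i => pvStep s (pvW i)) (0, 0)) := by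
  intro t
  induction t with
  | zero =>
    intro _
    rw [PySem.List.pyRange_one_eq_nil (by norm_num)]
    simp [pvF_nil]
  | succ t ih =>
    intro ht
    have ht' : (t : Int) ≤ n := by push_cast at ht ⊢; omega
    have hsplit : PySem.List.pyRange 1 (1 + ((t + 1 : Nat) : Int)) 1
        = PySem.List.pyRange 1 (1 + (t : Int)) 1 ++ [1 + (t : Int)] := by
      have : (1 : Int) + ((t + 1 : Nat) : Int) = (1 + (t : Int)) + 1 := by push_cast; ring
      rw [this, PySem.List.pyRange_one_succ_right (by omega)]
    set i : Int := 1 + (t : Int) with hidef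
    have hi1 : 1 ≤ i := by omega
    have hin : i ≤ n := by push_cast at ht; omega
    set P := PySem.List.pyRange 1 i 1 with hPdef
    have hPmem : ∀ j ∈ P, (pvDvalN j : Int) ≤ m := by
      intro j hj
      rw [hPdef, PySem.List.mem_pyRange_one] at hj
      exact hm j (by omega) (by omega)
    rw [hsplit, List.foldl_append, ih ht', List.foldl_append]
    simp only [List.foldl_cons, List.foldl_nil]
    rw [hdd i hi1 hin]
    rw [slice_sum_eq_pvW m i P hPmem hPdef]
    rw [pvF_step m P i (hm i hi1 hin)]
    simp only [pvStep]


theorem sieve_length (O : List Int) (g : Int → List Int) (d : List Int) :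
    (O.foldl (fun d i => (g i).foldl pvInc d) d).length = d.length := by
  induction O generalizing d with
  | nil => rfl
  | cons o O ih => simp only [List.foldl_cons]; rw [ih, pvInc_foldl_length]

theorem weakNumbers_alt_eq_ref (n : Int) :
    weakNumbers_alt n = [(pvRef n).1, (pvRef n).2] := by
  by_cases hn : n ≤ 0
  · rw [weakNumbers_alt, if_pos hn]
    unfold pvRef
    rw [PySem.List.pyRange_one_eq_nil (by omega)]
    rfl
  · have hn1 : 1 ≤ n := by omega
    rw [weakNumbers_alt, if_neg hn]
    simp only []
    set D : List Int :=
      (PySem.List.pyRange 1 (n + 1) 1).foldl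
        (fun d i =>
          (PySem.List.pyRange i (n + 1) i).foldl
            (fun d j => PySem.List.pySetD d j (PySem.List.pyGetD d j 0 + 1)) d)
        (List.replicate (n + 1).toNat 0) with hD
    have hDlen : (D.length : Int) = n + 1 := by
      rw [hD]
      show (((PySem.List.pyRange 1 (n + 1) 1).foldl
        (fun d i => (PySem.List.pyRange i (n + 1) i).foldl pvInc d)
        (List.replicate (n + 1).toNat 0)).length : Int) = n + 1
      rw [sieve_length]
      simp
      omega
    have hdd : ∀ j, 1 ≤ j → j ≤ n → PySem.List.pyGetD D j 0 = pvDval j := by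
      intro j h1 h2
      exact sieve_value n j hn1 h1 h2
    set m : Int := (PySem.List.max? D (fun x => x)).getD 0 with hmdef
    have hm : ∀ j, 1 ≤ j → j ≤ n → pvDval j ≤ m := by
      intro j h1 h2
      have hne : D ≠ [] := by
        intro h; rw [h] at hDlen; simp at hDlen; omega
      obtain ⟨z, hz⟩ : ∃ z, PySem.List.max? D (fun x => x) = some z := by
        cases hzz : PySem.List.max? D (fun x => x) with
        | none => exact absurd ((PySem.List.max?_eq_none_iff D _).mp hzz) hne
        | some z => exact ⟨z, rfl⟩
      have hmem : pvDval j ∈ D := by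
        rw [← hdd j h1 h2]
        exact PySem.List.pyGetD_mem D 0 (by unfold PySem.Raise.InRange; omega)
      have := PySem.List.max?_isMax hz _ hmem
      rw [hmdef, hz]
      exact this
    have hL := pvLoop D m n hdd hm n.toNat (by omega)
    rw [show (1 : Int) + (n.toNat : Int) = n + 1 by omega] at hL
    rw [hL]
    rfl

-- ===== VERDICT (by name: the statement is the Claim_ definition above) =====
theorem weakNumbers_spec : Claim_equal_weakNumbers := by
  intro n _
  show weakNumbers n = weakNumbers_alt n
  rw [weakNumbers_eq_ref, weakNumbers_alt_eq_ref]
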